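-- pv_equiv track=rewrite | github.com/tmprokill/Algorithms | DP/Homeworks/HW1/fourthlast.py | int_task
-- ===== SOURCE A (Python) =====
-- def decimalToBinary(n):
--     return list(bin(n).replace("0b", ""))
--
-- def binary_sum(a, b):
--     return bin(int(a, 2) + int(b, 2))[2:]
--
-- def generate_permutations(s):
--     result = []
--     s = sorted(s)
--
--     def backtrack(start):
--         if start == len(s):
--             result.append(''.join(s))
--             return
--         seen = set()
--         for i in range(start, len(s)):
--             if s[i] not in seen:
--                 seen.add(s[i])
--                 s[start], s[i] = s[i], s[start]
--                 backtrack(start + 1)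
--                 s[start], s[i] = s[i], s[start]
--
--     backtrack(0)
--     return result
--
-- def int_task(nums):
--     binary_representation = [decimalToBinary(i) for i in nums]
--     maxLength = len(max(binary_representation, key=len))
--
--     for i in range(len(binary_representation)):
--         diff = maxLength - len(binary_representation[i])
--         if diff != 0:
--             binary_representation[i] = ['0'] * diff + binary_representation[i]
--
--     for i in range(len(binary_representation)):
--         binary_representation[i] = sorted(binary_representation[i])
--
--     goal = binary_representation[2].count('1')
--
--     first_sorted = ''.join(binary_representation[0])
--     second_sorted = ''.join(binary_representation[1])
--
--     min_c_prime = float('inf')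
--
--     perm_a_list = generate_permutations(first_sorted)
--     perm_b_list = generate_permutations(second_sorted)
--
--     for a_perm in perm_a_list:
--         for b_perm in perm_b_list:
--             sum_bin = binary_sum(a_perm, b_perm)
--
--             if sum_bin.count('1') == goal:
--                 if len(sum_bin) <= maxLength:
--                     min_c_prime = min(min_c_prime, int(sum_bin, 2))
--
--     return min_c_prime if min_c_prime != float('inf') else -1
-- ===== SOURCE B (Python) =====
-- def int_task(nums):
--     # Pad width: length of the longest binary representation (bin(n) carries "0b", hence -2).
--     L = max(len(bin(n)) for n in nums) - 2
--
--     def pc(n):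
--         return bin(n).count('1')
--
--     goal = pc(nums[2])
--
--     def vals(l, k):
--         # all l-bit numbers (leading zeros allowed) whose binary form has exactly k ones,
--         # in increasing order
--         if k < 0 or l < k:
--             return []
--         if l == 0:
--             return [0]
--         return vals(l - 1, k) + [(1 << (l - 1)) + v for v in vals(l - 1, k - 1)]
--
--     xs = vals(L, pc(nums[0]))
--     ys = vals(L, pc(nums[1]))
--     best = -1
--     for x in xs:
--         for y in ys:
--             s = x + y
--             if pc(s) == goal and s < (1 << L):
--                 if best < 0 or s < best:
--                     best = s
--     return best
-- ===== Notes on version B (the rewrite author's own statement) =====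
-- stated objective: alternative
-- what changed: B replaces A's string machinery (swap-backtracking over digit-string permutations, binary string parsing/printing per pair) by direct recursive generation of the integers with the required bit-width and popcount, and pure integer arithmetic in the pair loop.
import Mathlib
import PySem

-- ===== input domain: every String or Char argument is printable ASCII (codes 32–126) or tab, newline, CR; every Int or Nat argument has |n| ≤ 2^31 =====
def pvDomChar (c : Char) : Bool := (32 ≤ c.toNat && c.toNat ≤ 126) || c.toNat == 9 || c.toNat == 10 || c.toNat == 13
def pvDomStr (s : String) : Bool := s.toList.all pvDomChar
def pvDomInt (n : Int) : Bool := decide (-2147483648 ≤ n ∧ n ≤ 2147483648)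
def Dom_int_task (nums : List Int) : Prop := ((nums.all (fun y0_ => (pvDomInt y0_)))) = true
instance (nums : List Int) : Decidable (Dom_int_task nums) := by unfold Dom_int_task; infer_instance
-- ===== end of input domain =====

-- B re-implements A's brute force over digit-string permutations by direct recursive
-- generation of the candidate integers and pure integer arithmetic (same minimum, no strings).

-- ===== PORT A =====
-- Python strings are carried as List Char (PySem.Chars is exact there); ''.join of a list
-- of single characters is the list itself.

-- list(bin(n).replace("0b", ""))
def decimalToBinary (n : Int) : List Char :=
  PySem.Chars.replace (PySem.Int.toBinChars0b n) ['0', 'b'] []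

-- hand port of int(s, 2), exact on the nonempty '0'/'1' strings this program feeds it
-- (PySem.Int.ofCharsBase? agrees there; its digit helper is private, so the fold is written out)
def pvIntBin (cs : List Char) : Int :=
  cs.foldl (fun acc c => 2 * acc + (if c = '1' then 1 else 0)) 0

-- bin(int(a,2) + int(b,2))[2:]
def binary_sum (a b : List Char) : List Char :=
  PySem.List.slice (PySem.Int.toBinChars0b (pvIntBin a + pvIntBin b)) (some 2) none

-- s[start], s[i] = s[i], s[start]
def gpSwap (s : List Char) (a b : Nat) : List Char :=
  (s.set a (s.getD b ' ')).set b (s.getD a ' ')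

mutual
-- backtrack(start) of generate_permutations; F is fuel (one unit per recursion level,
-- a totality guard only: generate_permutations supplies enough)
def gpBT (F : Nat) (s : List Char) (start : Nat) : List (List Char) × List Char :=
  match F with
  | 0 => ([], s)
  | F + 1 =>
    if start = s.length then ([s], s)
    else gpLoop F (s.length - start) s start start (PySem.Set.ofList [])
termination_by (F, 0)
decreasing_by exact Prod.Lex.left _ _ (Nat.lt_succ_self F)

-- the 'for i in range(start, len(s))' loop of backtrack; f is its fuel (see gpBT)
def gpLoop (F f : Nat) (s : List Char) (start i : Nat) (seen : PySem.Set Char) :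
    List (List Char) × List Char :=
  match f with
  | 0 => ([], s)
  | f + 1 =>
    if i < s.length then
      let c := s.getD i ' '
      if c ∈ seen then gpLoop F f s start (i + 1) seen
      else
        let seen' := seen.add c
        let s1 := gpSwap s start i
        let r1 := gpBT F s1 (start + 1)
        let s3 := gpSwap r1.2 start i
        let r2 := gpLoop F f s3 start (i + 1) seen'
        (r1.1 ++ r2.1, r2.2)
    else ([], s)
termination_by (F, f + 1)
decreasing_by
  · exact Prod.Lex.right _ (by omega)
  · exact Prod.Lex.right _ (by omega)
  · exact Prod.Lex.right _ (by omega)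
end

def generate_permutations (s0 : List Char) : List (List Char) :=
  let s := PySem.List.sorted s0 (fun c => c) false
  (gpBT (s.length + 1) s 0).1

def int_task (nums : List Int) : Int :=
  let binary_representation := nums.map (fun i => decimalToBinary i)
  -- len(max(..., key=len)); .elim 0 is unreachable under Pre_ (Python max raises on [])
  let maxLength := (PySem.List.max? binary_representation (fun l => (l.length : Int))).elim 0 List.length
  let br := binary_representation.map (fun l =>
    let diff := maxLength - l.length
    if diff ≠ 0 then List.replicate diff '0' ++ l else l)
  let br2 := br.map (fun l => PySem.List.sorted l (fun c => c) false)
  let goal := PySem.List.count (PySem.List.pyGetD br2 2 []) '1'  -- index 2 in range under Pre_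
  let first_sorted := PySem.List.pyGetD br2 0 []
  let second_sorted := PySem.List.pyGetD br2 1 []
  let perm_a_list := generate_permutations first_sorted
  let perm_b_list := generate_permutations second_sorted
  -- min_c_prime: float('inf') modelled as none
  let res : Option Int := perm_a_list.foldl (fun acc a_perm =>
    perm_b_list.foldl (fun acc b_perm =>
      let sum_bin := binary_sum a_perm b_perm
      if PySem.List.count sum_bin '1' = goal then
        if sum_bin.length ≤ maxLength then
          match acc with
          | none => some (pvIntBin sum_bin)
          | some m => some (min m (pvIntBin sum_bin))
        else acc
      else acc) acc) none
  match res with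
  | none => -1
  | some v => v

-- ===== PORT B =====

-- bin(n).count('1')
def pvPc (n : Int) : Int :=
  (PySem.List.count (PySem.Int.toBinChars0b n) '1' : Int)

-- vals(l, k): all l-bit numbers (leading zeros allowed) with exactly k ones, increasing
def pvVals (l k : Int) : List Int :=
  if k < 0 ∨ l < k then []
  else if l = 0 then [0]
  else pvVals (l - 1) k ++ (pvVals (l - 1) (k - 1)).map (fun v => 2 ^ (l - 1).toNat + v)
termination_by l.toNat
decreasing_by all_goals omega

def int_task_alt (nums : List Int) : Int :=
  -- max(len(bin(n)) for n in nums) - 2; .elim 0 is unreachable under Pre_ (max raises on [])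
  let L := (PySem.List.max? (nums.map (fun n => ((PySem.Int.toBinChars0b n).length : Int)))
      (fun x => x)).elim 0 id - 2
  let goal := pvPc (PySem.List.pyGetD nums 2 0)
  let xs := pvVals L (pvPc (PySem.List.pyGetD nums 0 0))
  let ys := pvVals L (pvPc (PySem.List.pyGetD nums 1 0))
  xs.foldl (fun best x =>
    ys.foldl (fun best y =>
      let s := x + y
      if pvPc s = goal ∧ s < 2 ^ L.toNat then
        if best < 0 ∨ s < best then s else best
      else best) best) (-1)

-- ===== PRECONDITION & SPEC =====
-- Pre_ excludes only inputs on which the Python A raises: fewer than 3 numbers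
-- (IndexError, or ValueError of max on []) and a negative first or second number
-- (the permutation loop reaches a string with an interior '-' and int(p, 2) raises ValueError).
def Pre_int_task (nums : List Int) : Prop :=
  3 ≤ nums.length ∧ 0 ≤ PySem.List.pyGetD nums 0 0 ∧ 0 ≤ PySem.List.pyGetD nums 1 0
instance (nums : List Int) : Decidable (Pre_int_task nums) := by unfold Pre_int_task; infer_instance

def pvWitness_int_task : List Int := [5, 3, 6]

def Spec_int_task (nums : List Int) (out : Int) : Prop := out = int_task_alt nums
instance (nums : List Int) (out : Int) : Decidable (Spec_int_task nums out) := by unfold Spec_int_task; infer_instance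

-- ===== CLAIM (what is proved, stated in full; the proofs are below) =====
def Claim_equal_int_task : Prop := ∀ (nums : List Int), Dom_int_task nums → Pre_int_task nums → Spec_int_task nums (int_task nums)

-- ===== LEMMAS AND PROOFS =====

/-! #### `Nat.toDigits 2` as an MSB-first recursion -/

def natBits (m : Nat) : List Char :=
  if h : m < 2 then [Nat.digitChar m] else natBits (m / 2) ++ [Nat.digitChar (m % 2)]
decreasing_by exact Nat.div_lt_self (by omega) (by omega)

theorem natBits_lt (m : Nat) (h : m < 2) : natBits m = [Nat.digitChar m] := by
  rw [natBits]; simp [h]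

theorem natBits_ge (m : Nat) (h : ¬ m < 2) :
    natBits m = natBits (m / 2) ++ [Nat.digitChar (m % 2)] := by
  rw [natBits]; simp [h]

theorem toDigitsCore2_eq (f : Nat) : ∀ m l, m < f → Nat.toDigitsCore 2 f m l = natBits m ++ l := by
  induction f with
  | zero => intro m l h; omega
  | succ f ih =>
    intro m l h
    by_cases h2 : m < 2
    · have hm : m ≤ 1 := by omega
      have : m % 2 = m := Nat.mod_eq_of_lt h2
      simp [Nat.toDigitsCore, hm, natBits_lt m h2, this]
    · have hm : ¬ m ≤ 1 := by omega
      have hdiv : m / 2 < f := by omega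
      simp [Nat.toDigitsCore, hm, ih (m / 2) _ hdiv, natBits_ge m h2]

theorem toDigits2_eq (m : Nat) : Nat.toDigits 2 m = natBits m := by
  have := toDigitsCore2_eq (m + 1) m [] (by omega)
  simpa [Nat.toDigits] using this

def isBin (w : List Char) : Prop := ∀ c ∈ w, c = '0' ∨ c = '1'

theorem natBits_isBin (m : Nat) : isBin (natBits m) := by
  induction m using Nat.strong_induction_on with
  | _ m ih =>
    by_cases h : m < 2
    · rw [natBits_lt m h]
      interval_cases m <;> simp [isBin, Nat.digitChar] <;> decide
    · rw [natBits_ge m h]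
      intro c hc
      rcases List.mem_append.mp hc with h1 | h1
      · exact ih (m / 2) (Nat.div_lt_self (by omega) (by omega)) c h1
      · have : m % 2 < 2 := Nat.mod_lt _ (by omega)
        interval_cases hmm : (m % 2) <;> simp_all [Nat.digitChar]

theorem natBits_ne_nil (m : Nat) : natBits m ≠ [] := by
  by_cases h : m < 2
  · rw [natBits_lt m h]; simp
  · rw [natBits_ge m h]; simp

theorem natBits_length_pos (m : Nat) : 1 ≤ (natBits m).length :=
  List.length_pos_iff.mpr (natBits_ne_nil m)

theorem natBits_length_le_iff (m L : Nat) (hL : 1 ≤ L) :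
    (natBits m).length ≤ L ↔ m < 2 ^ L := by
  induction L generalizing m with
  | zero => omega
  | succ L ih =>
    by_cases h : m < 2
    · have : m < 2 ^ (L + 1) := lt_of_lt_of_le h (by
        calc 2 = 2 ^ 1 := rfl
        _ ≤ 2 ^ (L + 1) := Nat.pow_le_pow_right (by omega) (by omega))
      simp [natBits_lt m h, this, hL]
    · rw [natBits_ge m h]
      by_cases hL1 : 1 ≤ L
      · rw [List.length_append]
        have := ih (m := m / 2) hL1
        simp only [List.length_cons, List.length_nil]
        constructor
        · intro hle
          have h1 : (natBits (m / 2)).length ≤ L := by omega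
          have h2 := (ih (m / 2) hL1).mp h1
          have h3 : m < 2 * 2 ^ L := by omega
          calc m < 2 * 2 ^ L := h3
          _ = 2 ^ (L + 1) := by ring
        · intro hlt
          have h1 : m / 2 < 2 ^ L := by
            have : 2 ^ (L + 1) = 2 ^ L * 2 := by ring
            omega
          have := (ih (m / 2) hL1).mpr h1
          omega
      · have hL0 : L = 0 := by omega
        subst hL0
        have h2 : (2 : ℕ) ^ (0 + 1) = 2 := by norm_num
        rw [List.length_append, h2]
        have hp := natBits_length_pos (m / 2)
        simp only [List.length_cons, List.length_nil]
        omega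

/-! #### `decimalToBinary` computed -/

def binRep (n : Int) : List Char :=
  if n < 0 then '-' :: natBits n.natAbs else natBits n.toNat

theorem replace_go_no_b (l : List Char) (hb : 'b' ∉ l) :
    ∀ fuel acc, PySem.Chars.replace.go ['0', 'b'] [] fuel l acc = acc.reverse ++ l := by
  induction l with
  | nil => intro fuel acc; cases fuel <;> simp [PySem.Chars.replace.go]
  | cons c t ih =>
    intro fuel acc
    cases fuel with
    | zero => simp [PySem.Chars.replace.go]
    | succ fuel =>
      have hpre : List.isPrefixOf ['0', 'b'] (c :: t) = false := by
        cases t with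
        | nil => simp [List.isPrefixOf]
        | cons d t' =>
          have hd : d ≠ 'b' := by intro hdd; exact hb (by simp [hdd])
          simp only [List.isPrefixOf, List.isPrefixOf_cons₂]
          simp
          intro _ h'
          exact hd h'.symm
      have hbt : 'b' ∉ t := fun h => hb (by simp [h])
      simp [PySem.Chars.replace.go, hpre, ih hbt fuel (c :: acc)]

theorem b_not_mem_natBits (m : Nat) : 'b' ∉ natBits m := by
  intro h
  rcases natBits_isBin m 'b' h with h1 | h1 <;> simp at h1

theorem decimalToBinary_eq (n : Int) : decimalToBinary n = binRep n := by
  unfold decimalToBinary binRep PySem.Int.toBinChars0b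
  by_cases h : n < 0 <;> simp only [h, if_pos, if_neg, toDigits2_eq, ite_true, ite_false]
  · show PySem.Chars.replace ('-' :: '0' :: 'b' :: natBits n.natAbs) ['0', 'b'] [] = _
    unfold PySem.Chars.replace
    simp only [List.isEmpty_cons, List.length_cons]
    show PySem.Chars.replace.go _ _ ((natBits n.natAbs).length + 1 + 1 + 1) _ [] = _
    simp only [PySem.Chars.replace.go]
    have hpre : List.isPrefixOf ['0', 'b'] ('-' :: '0' :: 'b' :: natBits n.natAbs) = false := by
      simp [List.isPrefixOf]
    rw [hpre]
    simp only [Bool.false_eq_true, if_false]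
    show PySem.Chars.replace.go _ _ ((natBits n.natAbs).length + 1 + 1) ('0' :: 'b' :: natBits n.natAbs) ['-'] = _
    simp only [PySem.Chars.replace.go]
    have hpre2 : List.isPrefixOf ['0', 'b'] ('0' :: 'b' :: natBits n.natAbs) = true := by
      simp [List.isPrefixOf]
    rw [hpre2]
    simp only [if_true]
    rw [replace_go_no_b _ (by simpa using b_not_mem_natBits n.natAbs)]
    simp
  · show PySem.Chars.replace ('0' :: 'b' :: natBits n.toNat) ['0', 'b'] [] = _
    unfold PySem.Chars.replace
    simp only [List.isEmpty_cons, List.length_cons]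
    show PySem.Chars.replace.go _ _ ((natBits n.toNat).length + 1 + 1) _ [] = _
    simp only [PySem.Chars.replace.go]
    have hpre2 : List.isPrefixOf ['0', 'b'] ('0' :: 'b' :: natBits n.toNat) = true := by
      simp [List.isPrefixOf]
    rw [hpre2]
    simp only [if_true]
    rw [replace_go_no_b _ (by simpa using b_not_mem_natBits n.toNat)]
    simp

/-! #### `pvIntBin` -/

theorem pvIntBin_shift (w : List Char) : ∀ a : Int,
    w.foldl (fun acc c => 2 * acc + (if c = '1' then 1 else 0)) a
      = a * 2 ^ w.length + w.foldl (fun acc c => 2 * acc + (if c = '1' then 1 else 0)) 0 := by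
  induction w with
  | nil => intro a; simp
  | cons c t ih =>
    intro a
    simp only [List.foldl_cons, List.length_cons]
    rw [ih (2 * a + _), ih (2 * 0 + _)]
    ring

theorem pvIntBin_cons (c : Char) (w : List Char) :
    pvIntBin (c :: w) = (if c = '1' then 1 else 0) * 2 ^ w.length + pvIntBin w := by
  unfold pvIntBin
  simp only [List.foldl_cons]
  rw [pvIntBin_shift w (2 * 0 + _)]
  ring_nf

theorem pvIntBin_cons0 (w : List Char) : pvIntBin ('0' :: w) = pvIntBin w := by
  rw [pvIntBin_cons, if_neg (by decide)]; ring

theorem pvIntBin_cons1 (w : List Char) : pvIntBin ('1' :: w) = 2 ^ w.length + pvIntBin w := by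
  rw [pvIntBin_cons, if_pos rfl]; ring

theorem pvIntBin_nonneg_aux (w : List Char) : ∀ a : Int, 0 ≤ a →
    0 ≤ w.foldl (fun acc c => 2 * acc + (if c = '1' then 1 else 0)) a := by
  induction w with
  | nil => intro a ha; simpa
  | cons c t ih =>
    intro a ha
    simp only [List.foldl_cons]
    exact ih _ (by split_ifs <;> omega)

theorem pvIntBin_nonneg (w : List Char) : 0 ≤ pvIntBin w :=
  pvIntBin_nonneg_aux w 0 le_rfl

theorem pvIntBin_natBits (m : Nat) : pvIntBin (natBits m) = (m : Int) := by
  induction m using Nat.strong_induction_on with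
  | _ m ih =>
    by_cases h : m < 2
    · rw [natBits_lt m h]
      interval_cases m <;> decide
    · rw [natBits_ge m h]
      unfold pvIntBin
      rw [List.foldl_append]
      show 2 * pvIntBin (natBits (m / 2)) + _ = (m : Int)
      rw [ih (m / 2) (Nat.div_lt_self (by omega) (by omega))]
      have h2 : m % 2 < 2 := Nat.mod_lt _ (by omega)
      have : (if Nat.digitChar (m % 2) = '1' then (1 : Int) else 0) = (m % 2 : Nat) := by
        interval_cases hmm : (m % 2) <;> simp [Nat.digitChar]
      rw [this]
      omega

/-! #### counting and sorting two-valued strings -/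

theorem count01_length (w : List Char) (h : isBin w) :
    List.count '0' w + List.count '1' w = w.length := by
  induction w with
  | nil => simp
  | cons c t ih =>
    have hc := h c (by simp)
    have ht : isBin t := fun x hx => h x (by simp [hx])
    have iht := ih ht
    rcases hc with hc | hc <;> subst hc
    · rw [List.count_cons_self, List.count_cons_of_ne (by decide)]
      simp only [List.length_cons]
      omega
    · rw [List.count_cons_self, List.count_cons_of_ne (by decide)]
      simp only [List.length_cons]
      omega

theorem sorted_binary (w : List Char) (h : isBin w) :
    PySem.List.sorted w (fun c => c) false
      = List.replicate (List.count '0' w) '0' ++ List.replicate (List.count '1' w) '1' := by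
  apply PySem.List.sorted_id_eq_of_perm_of_pairwise
  · apply List.perm_iff_count.mpr
    intro c
    rw [List.count_append, List.count_replicate, List.count_replicate]
    by_cases h0 : c = '0'
    · subst h0
      rw [if_pos (by decide), if_neg (by decide)]
      omega
    · by_cases h1 : c = '1'
      · subst h1
        rw [if_neg (by decide), if_pos (by decide)]
        omega
      · rw [if_neg (by simp; exact fun h' => h0 h'.symm),
           if_neg (by simp; exact fun h' => h1 h'.symm)]
        rw [eq_comm, List.count_eq_zero]
        intro hc
        rcases h c hc with h' | h' <;> [exact h0 h'; exact h1 h']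
  · apply List.pairwise_append.mpr
    refine ⟨List.pairwise_replicate.mpr ?_, List.pairwise_replicate.mpr ?_, ?_⟩
    · right; exact le_rfl
    · right; exact le_rfl
    · intro x hx y hy
      rw [List.eq_of_mem_replicate hx, List.eq_of_mem_replicate hy]
      decide

/-! #### the distinct binary strings with given counts, in A's order -/

def genStr (z k : Nat) : List (List Char) :=
  if z = 0 ∧ k = 0 then [[]]
  else
    (if hz : 0 < z then (genStr (z - 1) k).map (fun w => '0' :: w) else [])
      ++ (if hk : 0 < k then (genStr z (k - 1)).map (fun w => '1' :: w) else [])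
termination_by z + k
decreasing_by all_goals omega

theorem genStr_length : ∀ n z k, z + k = n → ∀ w ∈ genStr z k, w.length = z + k := by
  intro n
  induction n using Nat.strong_induction_on with
  | _ n ih =>
    intro z k hn w hw
    rw [genStr] at hw
    by_cases h0 : z = 0 ∧ k = 0
    · obtain ⟨rfl, rfl⟩ := h0
      simp at hw
      simp [hw]
    · rw [if_neg h0] at hw
      rcases List.mem_append.mp hw with hw | hw
      · by_cases hz : 0 < z
        · rw [dif_pos hz] at hw
          rcases List.mem_map.mp hw with ⟨u, hu, rfl⟩
          have := ih (z - 1 + k) (by omega) (z - 1) k rfl u hu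
          simp [this]; omega
        · rw [dif_neg hz] at hw; simp at hw
      · by_cases hk : 0 < k
        · rw [dif_pos hk] at hw
          rcases List.mem_map.mp hw with ⟨u, hu, rfl⟩
          have := ih (z + (k - 1)) (by omega) z (k - 1) rfl u hu
          simp [this]; omega
        · rw [dif_neg hk] at hw; simp at hw

theorem map_pvIntBin_genStr : ∀ n z k, z + k = n →
    (genStr z k).map pvIntBin = pvVals ((z + k : Nat) : Int) (k : Int) := by
  intro n
  induction n using Nat.strong_induction_on with
  | _ n ih =>
    intro z k hn
    by_cases h0 : z = 0 ∧ k = 0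
    · obtain ⟨rfl, rfl⟩ := h0
      rw [genStr, pvVals]
      norm_num
      decide
    · rw [genStr, if_neg h0, pvVals]
      have hkk : ¬ ((k : Int) < 0 ∨ ((z + k : Nat) : Int) < (k : Int)) := by
        push_neg; constructor <;> [positivity; exact_mod_cast Nat.le_add_left k z]
      rw [if_neg hkk, if_neg (by push_neg at h0 ⊢; omega)]
      rw [List.map_append]
      congr 1
      · by_cases hz : 0 < z
        · rw [dif_pos hz, List.map_map]
          have : ((z + k : Nat) : Int) - 1 = ((z - 1 + k : Nat) : Int) := by push_cast; omega
          rw [this, ← ih (z - 1 + k) (by omega) (z - 1) k rfl]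
          apply List.map_congr_left
          intro w hw
          simp only [Function.comp_apply]
          exact pvIntBin_cons0 w
        · have hz0 : z = 0 := by omega
          subst hz0
          rw [dif_neg hz]
          have : ((0 + k : Nat) : Int) - 1 < (k : Int) := by push_cast; omega
          rw [pvVals, if_pos (Or.inr this)]
          rfl
      · by_cases hk : 0 < k
        · rw [dif_pos hk, List.map_map]
          have he : ((z + k : Nat) : Int) - 1 = ((z + (k - 1) : Nat) : Int) := by push_cast; omega
          have he2 : (k : Int) - 1 = ((k - 1 : Nat) : Int) := by push_cast; omega
          rw [he, he2, ← ih (z + (k - 1)) (by omega) z (k - 1) rfl]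
          rw [List.map_map]
          apply List.map_congr_left
          intro w hw
          simp only [Function.comp_apply]
          rw [pvIntBin_cons1 w]
          have hlen := genStr_length (z + (k - 1)) z (k - 1) rfl w hw
          have hto : (((z + (k - 1) : Nat) : Int)).toNat = w.length := by
            rw [hlen]; omega
          rw [hto]
        · have hk0 : k = 0 := by omega
          subst hk0
          rw [dif_neg hk]
          have : ((0 : Nat) : Int) - 1 < 0 := by norm_num
          rw [pvVals, if_pos (Or.inl (by norm_num))]
          rfl

/-! #### the backtracking permutation generator on sorted binary strings -/

theorem length_pad (pre : List Char) (z k : Nat) :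
    (pre ++ List.replicate z '0' ++ List.replicate k '1').length = pre.length + z + k := by
  simp only [List.length_append, List.length_replicate]

theorem getD_pad0 (pre : List Char) (z k j : Nat) (h1 : pre.length ≤ j) (h2 : j < pre.length + z) :
    (pre ++ List.replicate z '0' ++ List.replicate k '1').getD j ' ' = '0' := by
  rw [List.append_assoc, List.getD_eq_getElem _ _ (by
      simp only [List.length_append, List.length_replicate]; omega),
     List.getElem_append_right (by omega), List.getElem_append_left (by
      simp only [List.length_replicate]; omega),
     List.getElem_replicate]

theorem getD_pad1 (pre : List Char) (z k j : Nat) (h1 : pre.length + z ≤ j)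
    (h2 : j < pre.length + z + k) :
    (pre ++ List.replicate z '0' ++ List.replicate k '1').getD j ' ' = '1' := by
  rw [List.getD_eq_getElem _ _ (by
      simp only [List.length_append, List.length_replicate]; omega),
     List.getElem_append_right (by
      simp only [List.length_append, List.length_replicate]; omega), List.getElem_replicate]

theorem gpSwap_self (s : List Char) (i : Nat) : gpSwap s i i = s := by
  unfold gpSwap
  by_cases h : i < s.length
  · rw [List.set_set, List.getD_eq_getElem _ _ h, List.set_getElem_self]
  · rw [List.set_eq_of_length_le (by rw [List.length_set]; omega),
       List.set_eq_of_length_le (by omega)]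

theorem rep_cons (z : Nat) (c : Char) (h : 0 < z) :
    List.replicate z c = c :: List.replicate (z - 1) c := by
  cases z with
  | zero => omega
  | succ z => simp [List.replicate_succ]

theorem rep_snoc (z : Nat) (c : Char) (h : 0 < z) :
    List.replicate z c = List.replicate (z - 1) c ++ [c] := by
  cases z with
  | zero => omega
  | succ z => simp [List.replicate_succ']

theorem gpSwap_mid (pre : List Char) (z k : Nat) (hz : 0 < z) (hk : 0 < k) :
    gpSwap (pre ++ List.replicate z '0' ++ List.replicate k '1') pre.length (pre.length + z)
      = (pre ++ ['1']) ++ List.replicate z '0' ++ List.replicate (k - 1) '1' := by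
  unfold gpSwap
  rw [getD_pad0 pre z k pre.length le_rfl (by omega),
     getD_pad1 pre z k (pre.length + z) le_rfl (by omega)]
  have s1 : (pre ++ List.replicate z '0' ++ List.replicate k '1').set pre.length '1'
      = (pre ++ ['1']) ++ (List.replicate (z - 1) '0' ++ List.replicate k '1') := by
    rw [List.append_assoc, List.set_append, if_neg (by omega), Nat.sub_self, List.set_append,
       if_pos (by simp only [List.length_replicate]; omega), rep_cons z '0' hz,
       List.set_cons_zero]
    simp
  rw [s1, List.set_append, if_neg (by
      simp only [List.length_append, List.length_cons, List.length_nil]; omega)]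
  have hzi : pre.length + z - (pre ++ ['1']).length = z - 1 := by
    simp only [List.length_append, List.length_cons, List.length_nil]; omega
  rw [hzi, List.set_append, if_neg (by simp only [List.length_replicate]; omega)]
  have hz0 : z - 1 - (List.replicate (z - 1) '0').length = 0 := by
    simp only [List.length_replicate]; omega
  rw [hz0, rep_cons k '1' hk, List.set_cons_zero]
  rw [show List.replicate z '0' = List.replicate (z - 1) '0' ++ ['0'] from rep_snoc z '0' hz]
  simp

theorem gpSwap_mid_inv (pre : List Char) (z k : Nat) (hz : 0 < z) (hk : 0 < k) :
    gpSwap ((pre ++ ['1']) ++ List.replicate z '0' ++ List.replicate (k - 1) '1')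
        pre.length (pre.length + z)
      = pre ++ List.replicate z '0' ++ List.replicate k '1' := by
  unfold gpSwap
  have hA : ((pre ++ ['1']) ++ List.replicate z '0' ++ List.replicate (k - 1) '1').getD
      pre.length ' ' = '1' := by
    rw [List.getD_eq_getElem _ _ (by
        simp only [List.length_append, List.length_replicate, List.length_cons,
          List.length_nil]; omega),
       List.getElem_append_left (by
        simp only [List.length_append, List.length_replicate, List.length_cons,
          List.length_nil]; omega),
       List.getElem_append_left (by
        simp only [List.length_append, List.length_cons, List.length_nil]; omega),
       List.getElem_append_right le_rfl]
    simp
  have hB : ((pre ++ ['1']) ++ List.replicate z '0' ++ List.replicate (k - 1) '1').getD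
      (pre.length + z) ' ' = '0' := by
    rw [List.append_assoc, List.getD_eq_getElem _ _ (by
        simp only [List.length_append, List.length_replicate, List.length_cons,
          List.length_nil]; omega),
       List.getElem_append_right (by
        simp only [List.length_append, List.length_cons, List.length_nil]; omega),
       List.getElem_append_left (by
        simp only [List.length_append, List.length_cons, List.length_nil,
          List.length_replicate]; omega),
       List.getElem_replicate]
  rw [hA, hB]
  have s1 : (((pre ++ ['1']) ++ List.replicate z '0' ++ List.replicate (k - 1) '1')).set
      pre.length '0' = (pre ++ ['0']) ++ (List.replicate z '0' ++ List.replicate (k - 1) '1') := by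
    rw [List.append_assoc, List.set_append, if_pos (by
        simp only [List.length_append, List.length_cons, List.length_nil]; omega),
       List.set_append, if_neg (by omega), Nat.sub_self, List.set_cons_zero]
  rw [s1, List.set_append, if_neg (by
      simp only [List.length_append, List.length_cons, List.length_nil]; omega)]
  have hzi : pre.length + z - (pre ++ ['0']).length = z - 1 := by
    simp only [List.length_append, List.length_cons, List.length_nil]; omega
  rw [hzi, List.set_append, if_pos (by simp only [List.length_replicate]; omega)]
  rw [show List.replicate z '0' = List.replicate (z - 1) '0' ++ ['0'] from rep_snoc z '0' hz,
     List.set_append, if_neg (by simp only [List.length_replicate]; omega)]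
  have hz0 : z - 1 - (List.replicate (z - 1) '0').length = 0 := by
    simp only [List.length_replicate]; omega
  rw [hz0, List.set_cons_zero]
  rw [show List.replicate k '1' = '1' :: List.replicate (k - 1) '1' from rep_cons k '1' hk]
  have e1 : '0' :: (List.replicate (z - 1) '0' ++ '1' :: List.replicate (k - 1) '1')
      = List.replicate z '0' ++ '1' :: List.replicate (k - 1) '1' := by
    rw [rep_cons z '0' hz]
    simp only [List.cons_append]
  have e2 : List.replicate (z - 1) '0' ++ '0' :: '1' :: List.replicate (k - 1) '1'
      = List.replicate z '0' ++ '1' :: List.replicate (k - 1) '1' := by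
    rw [rep_snoc z '0' hz]
    simp
  simp only [List.cons_append, List.append_assoc, List.nil_append, List.singleton_append]
  rw [e1, e2]


theorem gpLoop_skip (F : Nat) (s : List Char) (start : Nat) (seen : PySem.Set Char) :
    ∀ f i, (∀ j, i ≤ j → j < s.length → s.getD j ' ' ∈ seen) →
      gpLoop F f s start i seen = ([], s) := by
  intro f
  induction f with
  | zero => intro i h; rw [gpLoop]
  | succ f ih =>
    intro i h
    rw [gpLoop]
    by_cases hi : i < s.length
    · rw [if_pos hi]
      simp only
      rw [if_pos (h i le_rfl hi)]
      exact ih (i + 1) (fun j hj1 hj2 => h j (by omega) hj2)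
    · rw [if_neg hi]

theorem gpLoop_skip_to (F : Nat) (s : List Char) (start : Nat) (seen : PySem.Set Char) (m : Nat)
    (hm : m ≤ s.length) :
    ∀ f i, i ≤ m → (∀ j, i ≤ j → j < m → s.getD j ' ' ∈ seen) → m - i ≤ f →
      gpLoop F f s start i seen = gpLoop F (f - (m - i)) s start m seen := by
  intro f
  induction f with
  | zero =>
    intro i him h hf
    have : m = i := by omega
    subst this
    simp
  | succ f ih =>
    intro i him h hf
    by_cases heq : i = m
    · subst heq; simp
    · have him' : i < m := by omega
      rw [gpLoop, if_pos (by omega)]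
      simp only
      rw [if_pos (h i le_rfl him')]
      rw [ih (i + 1) (by omega) (fun j hj1 hj2 => h j (by omega) hj2) (by omega)]
      congr 1
      omega

theorem gpBT_char : ∀ n z k (pre : List Char) F, z + k = n → n < F →
    gpBT F (pre ++ List.replicate z '0' ++ List.replicate k '1') pre.length
      = ((genStr z k).map (fun w => pre ++ w),
         pre ++ List.replicate z '0' ++ List.replicate k '1') := by
  intro n
  induction n using Nat.strong_induction_on with
  | _ n ih =>
    intro z k pre F hn hF
    obtain ⟨F, rfl⟩ : ∃ F', F = F' + 1 := ⟨F - 1, by omega⟩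
    have hslen := length_pad pre z k
    rw [gpBT]
    by_cases hzk : z = 0 ∧ k = 0
    · obtain ⟨rfl, rfl⟩ := hzk
      rw [if_pos (by rw [length_pad]; omega)]
      rw [genStr]
      simp
    · rw [if_neg (by omega)]
      rw [show (pre ++ List.replicate z '0' ++ List.replicate k '1').length - pre.length
          = z + k from by omega]
      by_cases hz : 0 < z
      · -- s[start] = '0': recurse on the tail with the '0' fixed, then (if k > 0) on the '1' swap
        obtain ⟨m, hm⟩ : ∃ m, z + k = m + 1 := ⟨z + k - 1, by omega⟩
        rw [hm, gpLoop, if_pos (by omega)]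
        simp only
        rw [getD_pad0 pre z k pre.length le_rfl (by omega),
           if_neg (by simp [PySem.Set.mem_ofList])]
        rw [gpSwap_self]
        have hshape : pre ++ List.replicate z '0' ++ List.replicate k '1'
            = (pre ++ ['0']) ++ List.replicate (z - 1) '0' ++ List.replicate k '1' := by
          rw [rep_cons z '0' hz]; simp
        have hr1 : gpBT F (pre ++ List.replicate z '0' ++ List.replicate k '1') (pre.length + 1)
            = ((genStr (z - 1) k).map (fun w => (pre ++ ['0']) ++ w),
               pre ++ List.replicate z '0' ++ List.replicate k '1') := by
          rw [hshape, show pre.length + 1 = (pre ++ ['0']).length from by simp]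
          exact ih (z - 1 + k) (by omega) (z - 1) k (pre ++ ['0']) F rfl (by omega)
        rw [hr1]
        simp only
        rw [gpSwap_self]
        by_cases hk : 0 < k
        · -- skip the remaining '0' run, swap in the '1'
          rw [gpLoop_skip_to F _ pre.length _ (pre.length + z) (by omega) m (pre.length + 1)
             (by omega)
             (fun j hj1 hj2 => by
               rw [getD_pad0 pre z k j (by omega) (by omega)]
               exact (PySem.Set.mem_add _ _ _).mpr (Or.inr rfl))
             (by omega)]
          rw [show m - (pre.length + z - (pre.length + 1)) = k from by omega]
          obtain ⟨kk, rfl⟩ : ∃ kk, k = kk + 1 := ⟨k - 1, by omega⟩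
          rw [gpLoop, if_pos (by omega)]
          simp only
          rw [getD_pad1 pre z (kk + 1) (pre.length + z) le_rfl (by omega)]
          rw [if_neg (by
            intro hmem
            rcases (PySem.Set.mem_add _ _ _).mp hmem with h1 | h1
            · rw [PySem.Set.mem_ofList] at h1; simp at h1
            · simp at h1)]
          rw [gpSwap_mid pre z (kk + 1) hz (by omega)]
          simp only [Nat.add_sub_cancel]
          have hr2 : gpBT F ((pre ++ ['1']) ++ List.replicate z '0' ++ List.replicate kk '1')
              (pre.length + 1)
              = ((genStr z kk).map (fun w => (pre ++ ['1']) ++ w),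
                 (pre ++ ['1']) ++ List.replicate z '0' ++ List.replicate kk '1') := by
            rw [show pre.length + 1 = (pre ++ ['1']).length from by simp]
            exact ih (z + kk) (by omega) z kk (pre ++ ['1']) F rfl (by omega)
          rw [hr2]
          simp only
          rw [show gpSwap ((pre ++ ['1']) ++ List.replicate z '0' ++ List.replicate kk '1')
              pre.length (pre.length + z)
              = pre ++ List.replicate z '0' ++ List.replicate (kk + 1) '1' from by
            have := gpSwap_mid_inv pre z (kk + 1) hz (by omega)
            simpa using this]
          rw [gpLoop_skip F _ pre.length _ kk (pre.length + z + 1)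
             (fun j hj1 hj2 => by
               rw [getD_pad1 pre z (kk + 1) j (by omega) (by
                 rw [length_pad] at hj2; omega)]
               exact (PySem.Set.mem_add _ _ _).mpr (Or.inr rfl))]
          have hg : genStr z (kk + 1) = (genStr (z - 1) (kk + 1)).map (fun w => '0' :: w)
              ++ (genStr z kk).map (fun w => '1' :: w) := by
            rw [genStr, if_neg hzk, dif_pos hz, dif_pos (by omega : 0 < kk + 1)]
            simp only [Nat.add_sub_cancel]
          rw [hg]
          simp [List.map_map, Function.comp_def, List.append_assoc]
        · -- k = 0: skip the remaining '0' run to the end of the string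
          have hk0 : k = 0 := by omega
          subst hk0
          rw [gpLoop_skip F _ pre.length _ m (pre.length + 1)
             (fun j hj1 hj2 => by
               rw [getD_pad0 pre z 0 j (by omega) (by
                 rw [length_pad] at hj2; omega)]
               exact (PySem.Set.mem_add _ _ _).mpr (Or.inr rfl))]
          have hg : genStr z 0 = (genStr (z - 1) 0).map (fun w => '0' :: w) := by
            rw [genStr, if_neg hzk, dif_pos hz, dif_neg (by omega)]
            simp
          rw [hg]
          simp [List.map_map, Function.comp_def, List.append_assoc]
      · -- z = 0, k > 0: s[start] = '1'
        have hz0 : z = 0 := by omega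
        subst hz0
        have hk : 0 < k := by omega
        obtain ⟨kk, rfl⟩ : ∃ kk, k = kk + 1 := ⟨k - 1, by omega⟩
        rw [show (0 : Nat) + (kk + 1) = kk + 1 from by omega]
        rw [gpLoop, if_pos (by omega)]
        simp only
        rw [getD_pad1 pre 0 (kk + 1) pre.length (by omega) (by omega),
           if_neg (by simp [PySem.Set.mem_ofList])]
        rw [gpSwap_self]
        have hshape : pre ++ List.replicate 0 '0' ++ List.replicate (kk + 1) '1'
            = (pre ++ ['1']) ++ List.replicate 0 '0' ++ List.replicate kk '1' := by
          simp [List.replicate_succ]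
        have hr1 : gpBT F (pre ++ List.replicate 0 '0' ++ List.replicate (kk + 1) '1')
            (pre.length + 1)
            = ((genStr 0 kk).map (fun w => (pre ++ ['1']) ++ w),
               pre ++ List.replicate 0 '0' ++ List.replicate (kk + 1) '1') := by
          rw [hshape, show pre.length + 1 = (pre ++ ['1']).length from by simp]
          exact ih (0 + kk) (by omega) 0 kk (pre ++ ['1']) F rfl (by omega)
        rw [hr1]
        simp only
        rw [gpSwap_self]
        rw [gpLoop_skip F _ pre.length _ kk (pre.length + 1)
           (fun j hj1 hj2 => by
             rw [getD_pad1 pre 0 (kk + 1) j (by omega) (by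
               rw [length_pad] at hj2; omega)]
             exact (PySem.Set.mem_add _ _ _).mpr (Or.inr rfl))]
        have hg : genStr 0 (kk + 1) = (genStr 0 kk).map (fun w => '1' :: w) := by
          rw [genStr, if_neg hzk, dif_neg (by omega), dif_pos (by omega : 0 < kk + 1)]
          simp only [Nat.add_sub_cancel]
          simp
        rw [hg]
        simp [List.map_map, Function.comp_def, List.append_assoc]

/-! #### glue: permutations, counts, the pair condition -/

theorem gen_perms (w : List Char) (h : isBin w) :
    generate_permutations w = genStr (List.count '0' w) (List.count '1' w) := by
  unfold generate_permutations
  simp only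
  rw [sorted_binary w h]
  have hlen : (List.replicate (List.count '0' w) '0' ++ List.replicate (List.count '1' w) '1').length
      = List.count '0' w + List.count '1' w := by
    simp only [List.length_append, List.length_replicate]
  have := gpBT_char (List.count '0' w + List.count '1' w) (List.count '0' w) (List.count '1' w)
    [] (List.count '0' w + List.count '1' w + 1) rfl (by omega)
  simp only [List.nil_append, List.length_nil] at this
  rw [hlen, this]
  simp

theorem foldl_rel {α β γ : Type} (l : List α) (R : β → γ → Prop) (f : β → α → β) (g : γ → α → γ)
    (hstep : ∀ x ∈ l, ∀ a b, R a b → R (f a x) (g b x)) :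
    ∀ a b, R a b → R (l.foldl f a) (l.foldl g b) := by
  induction l with
  | nil => intro a b hab; simpa
  | cons x t ih =>
    intro a b hab
    simp only [List.foldl_cons]
    exact ih (fun y hy => hstep y (by simp [hy])) _ _ (hstep x (by simp) a b hab)

theorem count1_binRep (n : Int) :
    List.count '1' (binRep n) = List.count '1' (PySem.Int.toBinChars0b n) := by
  unfold binRep PySem.Int.toBinChars0b
  by_cases h : n < 0 <;> simp only [h, ite_true, ite_false, toDigits2_eq]
  · rw [List.count_cons_of_ne (by decide), List.count_cons_of_ne (by decide),
       List.count_cons_of_ne (by decide), List.count_cons_of_ne (by decide)]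
  · rw [List.count_cons_of_ne (by decide), List.count_cons_of_ne (by decide)]

theorem pvPc_eq_natBits (t : Int) (ht : 0 ≤ t) :
    pvPc t = (List.count '1' (natBits t.toNat) : Int) := by
  unfold pvPc
  rw [PySem.List.count_eq, ← count1_binRep]
  unfold binRep
  rw [if_neg (by omega)]

theorem binary_sum_eq (a b : List Char) (h : 0 ≤ pvIntBin a + pvIntBin b) :
    binary_sum a b = natBits (pvIntBin a + pvIntBin b).toNat := by
  unfold binary_sum PySem.Int.toBinChars0b
  rw [if_neg (by omega), toDigits2_eq]
  rw [show (2 : Int) = ((2 : Nat) : Int) from rfl, PySem.List.slice_from_natCast]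
  rfl

theorem count1_pad_sorted (l : List Char) (d : Nat) :
    List.count '1' (PySem.List.sorted
      (if d ≠ 0 then List.replicate d '0' ++ l else l) (fun c => c) false)
      = List.count '1' l := by
  rw [(PySem.List.sorted_perm _ _ _).count_eq]
  split_ifs with hd
  · rw [List.count_append, List.count_replicate, if_neg (by decide)]
    omega
  · rfl

theorem isBin_pad (l : List Char) (d : Nat) (h : isBin l) :
    isBin (if d ≠ 0 then List.replicate d '0' ++ l else l) := by
  split_ifs with hd
  · intro c hc
    rcases List.mem_append.mp hc with hc | hc
    · left; exact List.eq_of_mem_replicate hc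
    · exact h c hc
  · exact h

theorem length_pad_if (l : List Char) (M : Nat) (hle : l.length ≤ M) :
    (if M - l.length ≠ 0 then List.replicate (M - l.length) '0' ++ l else l).length = M := by
  split_ifs with hd
  · simp only [List.length_append, List.length_replicate]
    omega
  · omega

theorem binRep_length_pos (n : Int) : 1 ≤ (binRep n).length := by
  unfold binRep
  split_ifs
  · simp
  · exact natBits_length_pos _

theorem len_toBin0b (n : Int) :
    (PySem.Int.toBinChars0b n).length = (binRep n).length + 2 := by
  unfold PySem.Int.toBinChars0b binRep
  split_ifs <;> simp [toDigits2_eq]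

theorem maxM_le (nums : List Int) :
    ∀ n ∈ nums, (binRep n).length
      ≤ (PySem.List.max? (nums.map binRep) (fun l => (l.length : Int))).elim 0 List.length := by
  intro n hn
  obtain ⟨m, hm⟩ : ∃ m, PySem.List.max? (nums.map binRep) (fun l => (l.length : Int)) = some m := by
    rcases h : PySem.List.max? (nums.map binRep) (fun l => (l.length : Int)) with _ | m
    · rw [PySem.List.max?_eq_none_iff, List.map_eq_nil_iff] at h
      subst h
      exact absurd hn List.not_mem_nil
    · exact ⟨m, rfl⟩
  rw [hm]
  have := PySem.List.max?_isMax hm (binRep n) (List.mem_map_of_mem hn)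
  exact_mod_cast this

theorem maxM_pos (nums : List Int) (hne : nums ≠ []) :
    1 ≤ (PySem.List.max? (nums.map binRep) (fun l => (l.length : Int))).elim 0 List.length := by
  obtain ⟨m, hm⟩ : ∃ m, PySem.List.max? (nums.map binRep) (fun l => (l.length : Int)) = some m := by
    rcases h : PySem.List.max? (nums.map binRep) (fun l => (l.length : Int)) with _ | m
    · rw [PySem.List.max?_eq_none_iff, List.map_eq_nil_iff] at h
      exact absurd h hne
    · exact ⟨m, rfl⟩
  rw [hm]
  obtain ⟨n, hn, rfl⟩ := List.mem_map.mp (PySem.List.max?_mem hm)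
  exact binRep_length_pos n

theorem max_eq (nums : List Int) (hne : nums ≠ []) :
    ((PySem.List.max? (nums.map (fun n => ((PySem.Int.toBinChars0b n).length : Int)))
        (fun x => x)).elim 0 id - 2 : Int)
      = (((PySem.List.max? (nums.map binRep) (fun l => (l.length : Int))).elim 0 List.length : Nat) : Int) := by
  obtain ⟨m, hm⟩ : ∃ m, PySem.List.max? (nums.map binRep) (fun l => (l.length : Int)) = some m := by
    rcases h : PySem.List.max? (nums.map binRep) (fun l => (l.length : Int)) with _ | m
    · rw [PySem.List.max?_eq_none_iff, List.map_eq_nil_iff] at h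
      exact absurd h hne
    · exact ⟨m, rfl⟩
  obtain ⟨v, hv⟩ : ∃ v, PySem.List.max? (nums.map (fun n => ((PySem.Int.toBinChars0b n).length : Int)))
      (fun x => x) = some v := by
    rcases h : PySem.List.max? (nums.map (fun n => ((PySem.Int.toBinChars0b n).length : Int)))
        (fun x => x) with _ | v
    · rw [PySem.List.max?_eq_none_iff, List.map_eq_nil_iff] at h
      exact absurd h hne
    · exact ⟨v, rfl⟩
  rw [hm, hv]
  simp only [Option.elim, id]
  obtain ⟨n0, hn0, rfl⟩ := List.mem_map.mp (PySem.List.max?_mem hm)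
  obtain ⟨n1, hn1, rfl⟩ := List.mem_map.mp (PySem.List.max?_mem hv)
  have h1 : ((PySem.Int.toBinChars0b n0).length : Int)
      ≤ ((PySem.Int.toBinChars0b n1).length : Int) :=
    PySem.List.max?_isMax hv _ (List.mem_map_of_mem hn0)
  have h2 : ((binRep n1).length : Int) ≤ ((binRep n0).length : Int) :=
    PySem.List.max?_isMax hm (binRep n1) (List.mem_map_of_mem hn1)
  have e0 := len_toBin0b n0
  have e1 := len_toBin0b n1
  omega

def pvRel (o : Option Int) (bb : Int) : Prop :=
  (o = none ∧ bb = -1) ∨ ∃ v, o = some v ∧ bb = v ∧ 0 ≤ v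

theorem pyGetD_cons_zero {α : Type} (x0 : α) (xr : List α) (d : α) :
    PySem.List.pyGetD (x0 :: xr) 0 d = x0 := by
  rw [show (0 : Int) = ((0 : Nat) : Int) from rfl, PySem.List.pyGetD_natCast]; rfl

theorem pyGetD_cons_one {α : Type} (x0 x1 : α) (xr : List α) (d : α) :
    PySem.List.pyGetD (x0 :: x1 :: xr) 1 d = x1 := by
  rw [show (1 : Int) = ((1 : Nat) : Int) from rfl, PySem.List.pyGetD_natCast]; rfl

theorem pyGetD_cons_two {α : Type} (x0 x1 x2 : α) (xr : List α) (d : α) :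
    PySem.List.pyGetD (x0 :: x1 :: x2 :: xr) 2 d = x2 := by
  rw [show (2 : Int) = ((2 : Nat) : Int) from rfl, PySem.List.pyGetD_natCast]; rfl

theorem pvPc_eq_count_binRep (n : Int) : pvPc n = (List.count '1' (binRep n) : Int) := by
  unfold pvPc
  rw [PySem.List.count_eq, count1_binRep]

theorem binRep_isBin (n : Int) (h : 0 ≤ n) : isBin (binRep n) := by
  unfold binRep
  rw [if_neg (by omega)]
  exact natBits_isBin _

theorem sorted_pad_eq (l : List Char) (M : Nat) (hb : isBin l) (hle : l.length ≤ M) :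
    PySem.List.sorted (if M - l.length ≠ 0 then List.replicate (M - l.length) '0' ++ l else l)
      (fun c => c) false
      = List.replicate (M - List.count '1' l) '0' ++ List.replicate (List.count '1' l) '1' := by
  rw [sorted_binary _ (isBin_pad l (M - l.length) hb)]
  have c1 : List.count '1' (if M - l.length ≠ 0 then List.replicate (M - l.length) '0' ++ l else l)
      = List.count '1' l := by
    split_ifs
    · rw [List.count_append, List.count_replicate, if_neg (by decide)]
      omega
    · rfl
  have hlen := length_pad_if l M hle
  have c01 := count01_length _ (isBin_pad l (M - l.length) hb)
  rw [c1, show List.count '0' (if M - l.length ≠ 0 then List.replicate (M - l.length) '0' ++ l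
      else l) = M - List.count '1' l from by omega]

theorem gen_perms_rep (z k : Nat) :
    generate_permutations (List.replicate z '0' ++ List.replicate k '1') = genStr z k := by
  rw [gen_perms _ (by
    intro x hx
    rcases List.mem_append.mp hx with hx | hx
    · left; exact List.eq_of_mem_replicate hx
    · right; exact List.eq_of_mem_replicate hx)]
  rw [List.count_append, List.count_append, List.count_replicate, List.count_replicate,
     List.count_replicate, List.count_replicate]
  rw [if_pos (by decide), if_neg (by decide), if_neg (by decide), if_pos (by decide)]
  norm_num

theorem natBits_len_le_iff_int (s : Int) (hs : 0 ≤ s) (M : Nat) (hM1 : 1 ≤ M) :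
    (natBits s.toNat).length ≤ M ↔ s < 2 ^ M := by
  rw [natBits_length_le_iff _ M hM1]
  rw [← Int.toNat_of_nonneg hs]
  constructor <;> intro h <;> exact_mod_cast h

theorem pair_rel (M : Nat) (hM1 : 1 ≤ M) (goalN : Nat) (aw bw : List Char)
    (o : Option Int) (bb : Int) :
    pvRel o bb →
    pvRel
      (if List.count '1' (binary_sum aw bw) = goalN then
         if (binary_sum aw bw).length ≤ M then
           match o with
           | none => some (pvIntBin (binary_sum aw bw))
           | some m => some (min m (pvIntBin (binary_sum aw bw)))
         else o
       else o)
      (if pvPc (pvIntBin aw + pvIntBin bw) = (goalN : Int)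
          ∧ pvIntBin aw + pvIntBin bw < 2 ^ M then
         if bb < 0 ∨ pvIntBin aw + pvIntBin bw < bb then pvIntBin aw + pvIntBin bw else bb
       else bb) := by
  intro hR
  have hs : 0 ≤ pvIntBin aw + pvIntBin bw :=
    add_nonneg (pvIntBin_nonneg _) (pvIntBin_nonneg _)
  rw [binary_sum_eq aw bw hs, pvPc_eq_natBits _ hs]
  have hval : pvIntBin (natBits (pvIntBin aw + pvIntBin bw).toNat)
      = pvIntBin aw + pvIntBin bw := by
    rw [pvIntBin_natBits]
    exact Int.toNat_of_nonneg hs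
  rw [hval]
  by_cases hc1 : List.count '1' (natBits (pvIntBin aw + pvIntBin bw).toNat) = goalN
  · rw [if_pos hc1]
    by_cases hc2 : (natBits (pvIntBin aw + pvIntBin bw).toNat).length ≤ M
    · rw [if_pos hc2, if_pos ⟨by exact_mod_cast hc1,
         (natBits_len_le_iff_int _ hs M hM1).mp hc2⟩]
      rcases hR with ⟨ho, hb⟩ | ⟨v, ho, hb, hv⟩
      · subst ho; subst hb
        rw [if_pos (by norm_num)]
        exact Or.inr ⟨_, rfl, rfl, hs⟩
      · subst hb; subst ho
        refine Or.inr ⟨min bb (pvIntBin aw + pvIntBin bw), rfl, ?_, le_min hv hs⟩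
        rw [Int.min_def]
        split_ifs <;> omega
    · rw [if_neg hc2, if_neg (by
        intro ⟨_, hlt⟩
        exact hc2 ((natBits_len_le_iff_int _ hs M hM1).mpr hlt))]
      exact hR
  · rw [if_neg hc1, if_neg (by
      intro ⟨hcast, _⟩
      exact hc1 (by exact_mod_cast hcast))]
    exact hR

theorem int_task_eq (a b c : Int) (rest : List Int) (h0 : 0 ≤ a) (h1 : 0 ≤ b) :
    int_task (a :: b :: c :: rest) = int_task_alt (a :: b :: c :: rest) := by
  unfold int_task int_task_alt
  simp only [List.map_cons, decimalToBinary_eq, pyGetD_cons_zero, pyGetD_cons_one,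
    pyGetD_cons_two]
  have hL := max_eq (a :: b :: c :: rest) (by simp)
  simp only [List.map_cons] at hL
  rw [hL]
  simp only [Int.toNat_natCast]
  have hM1 : 1 ≤ (PySem.List.max? (binRep a :: binRep b :: binRep c :: List.map binRep rest)
      (fun l => (l.length : Int))).elim 0 List.length := by
    have := maxM_pos (a :: b :: c :: rest) (by simp)
    simpa using this
  have hlea : (binRep a).length ≤ (PySem.List.max? (binRep a :: binRep b :: binRep c ::
      List.map binRep rest) (fun l => (l.length : Int))).elim 0 List.length := by
    have := maxM_le (a :: b :: c :: rest) a (by simp)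
    simpa using this
  have hleb : (binRep b).length ≤ (PySem.List.max? (binRep a :: binRep b :: binRep c ::
      List.map binRep rest) (fun l => (l.length : Int))).elim 0 List.length := by
    have := maxM_le (a :: b :: c :: rest) b (by simp)
    simpa using this
  set M := (PySem.List.max? (binRep a :: binRep b :: binRep c :: List.map binRep rest)
      (fun l => (l.length : Int))).elim 0 List.length with hMdef
  simp only [sorted_pad_eq (binRep a) M (binRep_isBin a h0) hlea,
    sorted_pad_eq (binRep b) M (binRep_isBin b h1) hleb,
    count1_pad_sorted, gen_perms_rep, PySem.List.count_eq,
    show pvPc a = ((List.count '1' (binRep a) : Nat) : Int) from pvPc_eq_count_binRep a,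
    show pvPc b = ((List.count '1' (binRep b) : Nat) : Int) from pvPc_eq_count_binRep b,
    show pvPc c = ((List.count '1' (binRep c) : Nat) : Int) from pvPc_eq_count_binRep c]
  have hxs : pvVals (M : Int) ((List.count '1' (binRep a) : Nat) : Int)
      = (genStr (M - List.count '1' (binRep a)) (List.count '1' (binRep a))).map pvIntBin := by
    rw [map_pvIntBin_genStr (M - List.count '1' (binRep a) + List.count '1' (binRep a))
       _ _ rfl]
    congr 1
    have : List.count '1' (binRep a) ≤ (binRep a).length := List.count_le_length
    omega
  have hys : pvVals (M : Int) ((List.count '1' (binRep b) : Nat) : Int)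
      = (genStr (M - List.count '1' (binRep b)) (List.count '1' (binRep b))).map pvIntBin := by
    rw [map_pvIntBin_genStr (M - List.count '1' (binRep b) + List.count '1' (binRep b))
       _ _ rfl]
    congr 1
    have : List.count '1' (binRep b) ≤ (binRep b).length := List.count_le_length
    omega
  rw [hxs, hys]
  simp only [List.foldl_map]
  have hmain := foldl_rel (genStr (M - List.count '1' (binRep a)) (List.count '1' (binRep a)))
    pvRel _ _
    (fun aw _ o bb hR =>
      foldl_rel (genStr (M - List.count '1' (binRep b)) (List.count '1' (binRep b)))
        pvRel _ _
        (fun bw _ o' bb' hR' => pair_rel M hM1 (List.count '1' (binRep c)) aw bw o' bb' hR')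
        o bb hR)
    none (-1) (Or.inl ⟨rfl, rfl⟩)
  rcases hmain with ⟨hA, hB⟩ | ⟨v, hA, hB, _⟩ <;> rw [hA, hB]

-- ===== VERDICT (by name: the statement is the Claim_ definition above) =====
theorem int_task_spec : Claim_equal_int_task := by
  intro nums _ hpre
  obtain ⟨h3, h0, h1⟩ := hpre
  rcases nums with _ | ⟨a, _ | ⟨b, _ | ⟨c, rest⟩⟩⟩
  · simp at h3
  · simp at h3
  · simp at h3
  · rw [pyGetD_cons_zero] at h0
    rw [pyGetD_cons_one] at h1
    exact int_task_eq a b c rest h0 h1
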